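-- pv_equiv track=rewrite | github.com/v-hegde31/APS-2020 | CodeLib/130-Google-foo.bar-Level-2-lovely-lucky-lambs.py | getMinVal
-- ===== SOURCE A (Python) =====
-- def getMinVal(total_lambs):
--     n, sum, count = 1, 1, 1
--     while True:
--         n*=2
--         sum += n
--         if sum > total_lambs:
--             break
--         count+=1
--     return count
-- ===== SOURCE B (Python) =====
-- def getMinVal(total_lambs):
--     if total_lambs <= 0:
--         return 1
--     return max(1, (total_lambs + 1).bit_length() - 1)
-- ===== Notes on version B (the rewrite author's own statement) =====
-- stated objective: simpler
-- what changed: Replaces the doubling while-loop with the closed form max(1, (total_lambs+1).bit_length()-1), since the loop's answer is the largest k>=1 with 2^(k+1)-1 <= total_lambs, i.e. floor(log2(total_lambs+1)).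
import Mathlib
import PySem

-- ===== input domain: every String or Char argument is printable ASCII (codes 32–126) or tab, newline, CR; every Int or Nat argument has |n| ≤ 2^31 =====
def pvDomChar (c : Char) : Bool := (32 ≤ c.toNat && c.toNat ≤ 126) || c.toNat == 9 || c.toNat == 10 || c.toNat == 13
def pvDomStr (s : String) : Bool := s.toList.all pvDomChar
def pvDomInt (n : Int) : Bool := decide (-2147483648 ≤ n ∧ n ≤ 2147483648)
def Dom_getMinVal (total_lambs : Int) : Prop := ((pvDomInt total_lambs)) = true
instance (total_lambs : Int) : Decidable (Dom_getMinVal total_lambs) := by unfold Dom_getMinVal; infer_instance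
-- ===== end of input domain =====

-- B replaces A's doubling while-loop by the closed form max(1, (total+1).bit_length()-1); objective: simpler.

-- ===== PORT A =====
-- A's `while True` loop over state (n, sum, count); the proof argument 0 < n only
-- justifies termination (sum strictly grows each iteration).
def getMinValLoop (total_lambs n sum count : Int) (h : 0 < n) : Int :=
  if hc : sum + n * 2 > total_lambs then count
  else getMinValLoop total_lambs (n * 2) (sum + n * 2) (count + 1) (by omega)
termination_by (total_lambs - sum).toNat
decreasing_by
  omega

def getMinVal (total_lambs : Int) : Int :=
  getMinValLoop total_lambs 1 1 1 (by omega)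

-- ===== PORT B =====
-- bit_length of a positive integer m is Nat.log2 m + 1, so (total+1).bit_length() - 1 = Nat.log2 (total+1).
def getMinVal_alt (total_lambs : Int) : Int :=
  if total_lambs ≤ 0 then 1
  else max 1 ((Nat.log2 (total_lambs + 1).toNat : Int))

-- ===== PRECONDITION & SPEC =====
def Spec_getMinVal (total_lambs : Int) (out : Int) : Prop := out = getMinVal_alt total_lambs
instance (total_lambs : Int) (out : Int) : Decidable (Spec_getMinVal total_lambs out) := by unfold Spec_getMinVal; infer_instance

-- ===== CLAIM (what is proved, stated in full; the proofs are below) =====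
def Claim_equal_getMinVal : Prop := ∀ (total_lambs : Int), Dom_getMinVal total_lambs → Spec_getMinVal total_lambs (getMinVal total_lambs)

-- ===== LEMMAS AND PROOFS =====

lemma pvCastPow (m : Nat) : ((2:Int)) ^ m = ((2 ^ m : Nat) : Int) := by push_cast; ring

lemma pvLog2_lt (total : Int) (k : Nat) (hk : 0 < k)
    (hlt : total + 1 < ((2 ^ k : Nat) : Int)) :
    Nat.log2 (total + 1).toNat < k := by
  by_cases hz : (total + 1).toNat = 0
  · simpa [hz, Nat.log2] using hk
  · exact (Nat.log2_lt hz).mpr (by omega)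

lemma pvLe_log2 (total : Int) (k : Nat)
    (hge : ((2 ^ k : Nat) : Int) ≤ total + 1) :
    k ≤ Nat.log2 (total + 1).toNat := by
  have hp : 0 < 2 ^ k := Nat.two_pow_pos k
  have hz : (total + 1).toNat ≠ 0 := by omega
  exact (Nat.le_log2 hz).mpr (by omega)

-- Loop invariant: entering the loop with n = 2^k, sum = 2^(k+1)-1, count = k+1,
-- the loop returns max (k+1) ⌊log2 (total+1)⌋.
lemma getMinValLoop_pow (total_lambs : Int) :
    ∀ (N k : Nat) (h : (0:Int) < 2 ^ k), (total_lambs - (2 ^ (k+1) - 1)).toNat ≤ N →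
      getMinValLoop total_lambs (2 ^ k) (2 ^ (k+1) - 1) (k + 1) h =
        max ((k : Int) + 1) ((Nat.log2 (total_lambs + 1).toNat : Int)) := by
  intro N
  induction N with
  | zero =>
      intro k h hN
      have hc0 := pvCastPow k
      have hc1 := pvCastPow (k+1)
      have hc2 := pvCastPow (k+2)
      have hm1 : (2:Int) ^ (k+1) = 2 ^ k * 2 := by rw [pow_succ]
      have hm2 : (2:Int) ^ (k+2) = 2 ^ (k+1) * 2 := by rw [pow_succ]
      have hp0 : 0 < 2 ^ k := Nat.two_pow_pos k
      have hbr : (2:Int) ^ (k+1) - 1 + 2 ^ k * 2 > total_lambs := by omega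
      rw [getMinValLoop, dif_pos hbr]
      have hle := pvLog2_lt total_lambs (k+2) (by omega) (by omega)
      omega
  | succ N ih =>
      intro k h hN
      have hc0 := pvCastPow k
      have hc1 := pvCastPow (k+1)
      have hc2 := pvCastPow (k+2)
      have hm1 : (2:Int) ^ (k+1) = 2 ^ k * 2 := by rw [pow_succ]
      have hm2 : (2:Int) ^ (k+2) = 2 ^ (k+1) * 2 := by rw [pow_succ]
      have hp0 : 0 < 2 ^ k := Nat.two_pow_pos k
      have hp1 : 0 < 2 ^ (k+1) := Nat.two_pow_pos (k+1)
      rw [getMinValLoop]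
      by_cases hbr : (2:Int) ^ (k+1) - 1 + 2 ^ k * 2 > total_lambs
      · rw [dif_pos hbr]
        have hle := pvLog2_lt total_lambs (k+2) (by omega) (by omega)
        omega
      · rw [dif_neg hbr]
        have e1 : (2:Int) ^ k * 2 = 2 ^ (k+1) := hm1.symm
        have e3 : (k : Int) + 1 + 1 = ((k+1 : Nat) : Int) + 1 := by push_cast; ring
        simp only [e1, e3]
        rw [show (2:Int) ^ (k+1) - 1 + 2 ^ (k+1) = 2 ^ (k+1+1) - 1 from by
          rw [pow_succ 2 (k+1)]; ring]
        rw [ih (k+1) (by positivity) (by omega)]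
        have hge := pvLe_log2 total_lambs (k+2) (by omega)
        omega

theorem getMinVal_spec : Claim_equal_getMinVal := by
  intro total_lambs _
  unfold Spec_getMinVal getMinVal getMinVal_alt
  have H := getMinValLoop_pow total_lambs (total_lambs - 1).toNat 0 (by norm_num) (by omega)
  norm_num at H
  refine H.trans ?_
  by_cases hneg : total_lambs ≤ 0
  · rw [if_pos hneg]
    have hle := pvLog2_lt total_lambs 1 (by omega) (by push_cast; omega)
    omega
  · rw [if_neg hneg]
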